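-- pv_equiv track=rewrite | github.com/dpuenteramirez/AV-Parser | av_parser/core/kiuwan/insights/_parser.py | _n_line_seps
-- ===== SOURCE A (Python) =====
-- def _n_line_seps(line, sep):
--     """It counts the number of times the separator character appears in the
--     line, but only if it's not inside a pair of double quotes.
--
--     Parameters
--     ----------
--     line
--         the line of text to be parsed
--     sep
--         the separator character
--
--     Returns
--     -------
--         The number of times the separator is found in the line.
--
--     """
--     inside_quotes = False
--     n_seps = 0
--     for char in line:
--         if char == '"':
--             inside_quotes = not inside_quotes
--         elif char == sep and not inside_quotes:
--             n_seps += 1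
--
--     return n_seps
-- ===== SOURCE B (Python) =====
-- def _n_line_seps(line, sep):
--     if len(sep) != 1:
--         return 0
--     return sum(seg.count(sep) for i, seg in enumerate(line.split('"')) if i % 2 == 0)
-- ===== Notes on version B (the rewrite author's own statement) =====
-- stated objective: simpler
-- what changed: Replaces the stateful inside-quotes toggle-flag scan with a split-on-quote decomposition: split the line on '"' and sum sep counts over even-indexed (outside-quote) segments, guarded by len(sep)==1 to keep the original single-character comparison semantics.
import Mathlib
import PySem

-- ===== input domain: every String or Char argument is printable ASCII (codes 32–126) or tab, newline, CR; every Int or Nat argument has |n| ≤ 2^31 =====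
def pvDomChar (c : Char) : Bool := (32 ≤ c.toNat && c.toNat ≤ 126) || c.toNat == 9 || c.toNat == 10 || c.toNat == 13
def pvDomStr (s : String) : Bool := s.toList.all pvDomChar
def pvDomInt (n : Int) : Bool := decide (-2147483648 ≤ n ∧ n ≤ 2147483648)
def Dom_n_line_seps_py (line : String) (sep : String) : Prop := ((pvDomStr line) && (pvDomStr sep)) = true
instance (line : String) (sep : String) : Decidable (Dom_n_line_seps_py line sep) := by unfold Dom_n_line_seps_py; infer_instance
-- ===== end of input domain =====

-- B replaces A's stateful inside-quotes toggle scan by splitting the line on '"' and summing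
-- separator counts over the even-indexed (outside-quote) segments (objective: simpler decomposition).

-- ===== PORT A =====
-- literal port of A: one pass over the characters with an inside_quotes flag and a counter
def n_line_seps_py (line : String) (sep : String) : Int :=
  (line.toList.foldl
    (fun (st : Bool × Int) (char : Char) =>
      if char == '"' then (!st.1, st.2)
      else if [char] == sep.toList && !st.1 then (st.1, st.2 + 1)
      else st)
    (false, 0)).2

-- ===== PORT B =====
-- literal port of B: guard len(sep)==1, split on '"', sum sep-counts over even-indexed segments
def n_line_seps_py_alt (line : String) (sep : String) : Int :=
  if PySem.Str.len sep ≠ 1 then 0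
  else
    (PySem.List.enumerate (PySem.Chars.splitOn line.toList ['"'])).foldl
      (fun (acc : Int) (p : Int × List Char) =>
        if PySem.Int.mod p.1 2 == 0 then acc + (PySem.Chars.count p.2 sep.toList : Int) else acc)
      0

-- ===== PRECONDITION & SPEC =====
def Spec_n_line_seps_py (line : String) (sep : String) (out : Int) : Prop := out = n_line_seps_py_alt line sep
instance (line : String) (sep : String) (out : Int) : Decidable (Spec_n_line_seps_py line sep out) := by unfold Spec_n_line_seps_py; infer_instance

-- ===== CLAIM (what is proved, stated in full; the proofs are below) =====
def Claim_equal_n_line_seps_py : Prop := ∀ (line : String) (sep : String), Dom_n_line_seps_py line sep → Spec_n_line_seps_py line sep (n_line_seps_py line sep)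

-- ===== LEMMAS AND PROOFS =====

-- reference single-character split, structurally recursive (proof helper only)
def qsplit (q : Char) : List Char → List (List Char)
  | [] => [[]]
  | c :: cs =>
    if c = q then [] :: qsplit q cs
    else
      match qsplit q cs with
      | [] => [[c]]
      | s :: ss => (c :: s) :: ss

-- alternating sum of per-segment counts of a character; b = "currently counting" (outside quotes)
def segsum (c : Char) : List (List Char) → Bool → Int
  | [], _ => 0
  | s :: ss, b => (if b then (s.count c : Int) else 0) + segsum c ss (!b)

theorem qsplit_ne_nil (q : Char) (cs : List Char) : qsplit q cs ≠ [] := by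
  induction cs with
  | nil => simp [qsplit]
  | cons c cs ih =>
    simp only [qsplit]
    split
    · simp
    · cases h : qsplit q cs <;> simp

theorem splitOn_go_single (q : Char) (l : List Char) :
    ∀ (fuel : Nat), l.length ≤ fuel → ∀ (cur : List Char) (acc : List (List Char)),
      PySem.Chars.splitOn.go [q] fuel l cur acc
        = acc.reverse ++ (qsplit q l).modifyHead (fun s => cur.reverse ++ s) := by
  induction l with
  | nil =>
    intro fuel _ cur acc
    cases fuel <;> simp [PySem.Chars.splitOn.go, qsplit]
  | cons c cs ih =>
    intro fuel hf cur acc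
    cases fuel with
    | zero => simp at hf
    | succ f =>
      simp only [List.length_cons, Nat.succ_le_succ_iff] at hf
      by_cases hc : c = q
      · subst hc
        have hpre : List.isPrefixOf [c] (c :: cs) = true := by
          simp [List.isPrefixOf]
        simp only [PySem.Chars.splitOn.go, hpre]
        rw [if_pos trivial]
        rw [show List.drop [c].length (c :: cs) = cs from rfl]
        rw [ih f hf]
        have := qsplit_ne_nil c cs
        cases hq : qsplit c cs with
        | nil => exact absurd hq this
        | cons s ss => simp [qsplit, hq]
      · have hpre : List.isPrefixOf [q] (c :: cs) = false := by
          simp [List.isPrefixOf]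
          intro h; exact absurd h.symm hc
        simp only [PySem.Chars.splitOn.go, hpre]
        rw [if_neg (by simp)]
        rw [ih f hf]
        have := qsplit_ne_nil q cs
        cases hq : qsplit q cs with
        | nil => exact absurd hq this
        | cons s ss =>
          simp [qsplit, hc, hq, List.modifyHead]

theorem splitOn_single (q : Char) (l : List Char) :
    PySem.Chars.splitOn l [q] = qsplit q l := by
  unfold PySem.Chars.splitOn
  rw [splitOn_go_single q l (l.length + 1) (by omega)]
  cases h : qsplit q l with
  | nil => exact absurd h (qsplit_ne_nil q l)
  | cons s ss => simp

theorem count_go_single (c : Char) (l : List Char) :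
    ∀ (fuel : Nat), l.length ≤ fuel → ∀ (acc : Nat),
      PySem.Chars.count.go [c] fuel l acc = acc + l.count c := by
  induction l with
  | nil => intro fuel _ acc; cases fuel <;> simp [PySem.Chars.count.go]
  | cons x xs ih =>
    intro fuel hf acc
    cases fuel with
    | zero => simp at hf
    | succ f =>
      simp only [List.length_cons, Nat.succ_le_succ_iff] at hf
      by_cases hx : c = x
      · subst hx
        have hpre : List.isPrefixOf [c] (c :: xs) = true := by simp [List.isPrefixOf]
        simp only [PySem.Chars.count.go, hpre]
        rw [if_pos trivial]
        rw [show List.drop [c].length (c :: xs) = xs from rfl]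
        rw [ih f hf]
        simp
        omega
      · have hpre : List.isPrefixOf [c] (x :: xs) = false := by
          simp [List.isPrefixOf]
          intro h; exact absurd h hx
        simp only [PySem.Chars.count.go, hpre]
        rw [if_neg (by simp)]
        rw [ih f hf]
        simp [Ne.symm hx]

theorem count_single (c : Char) (l : List Char) :
    PySem.Chars.count l [c] = l.count c := by
  unfold PySem.Chars.count
  simp [count_go_single c l l.length (le_refl _) 0]

theorem mod_two_succ (n : Int) :
    (PySem.Int.mod (n + 1) 2 == 0) = !(PySem.Int.mod n 2 == 0) := by
  have h : ∀ m : Int, PySem.Int.mod m 2 = m % 2 := by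
    intro m; simp [PySem.Int.mod, Int.fmod_eq_emod]
  rw [h, h]
  rcases Int.emod_two_eq_zero_or_one n with h0 | h1
  · simp [h0]
    omega
  · simp [h1]
    omega

theorem a_loop_invariant (sepc : Char) (sep : String) (hsep : sep.toList = [sepc])
    (cs : List Char) : ∀ (inside : Bool) (n : Int),
    (cs.foldl
      (fun (st : Bool × Int) (char : Char) =>
        if char == '"' then (!st.1, st.2)
        else if [char] == sep.toList && !st.1 then (st.1, st.2 + 1)
        else st)
      (inside, n)).2 = n + segsum sepc (qsplit '"' cs) (!inside) := by
  induction cs with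
  | nil => intro inside n; simp [qsplit, segsum]
  | cons c cs ih =>
    intro inside n
    simp only [List.foldl_cons]
    by_cases hc : c = '"'
    · subst hc
      rw [if_pos (by simp)]
      rw [ih]
      simp [qsplit, segsum]
    · rw [if_neg (by simp [hc])]
      by_cases hs : c = sepc
      · subst hs
        by_cases hin : inside
        · subst hin
          rw [if_neg (by simp)]
          rw [ih]
          have := qsplit_ne_nil '"' cs
          cases hq : qsplit '"' cs with
          | nil => exact absurd hq this
          | cons s ss => simp [qsplit, hc, hq, segsum]
        · simp only [Bool.not_eq_true] at hin; subst hin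
          rw [if_pos (by simp [hsep])]
          rw [ih]
          have := qsplit_ne_nil '"' cs
          cases hq : qsplit '"' cs with
          | nil => exact absurd hq this
          | cons s ss =>
            simp [qsplit, hc, hq, segsum, List.count_cons]
            push_cast
            ring
      · rw [if_neg (by simp [hsep, hs])]
        rw [ih]
        have := qsplit_ne_nil '"' cs
        cases hq : qsplit '"' cs with
        | nil => exact absurd hq this
        | cons s ss =>
          cases inside <;>
            simp [qsplit, hc, hq, segsum, hs]

theorem b_loop_eq_segsum (sepc : Char) (sep : String) (hsep : sep.toList = [sepc])
    (segs : List (List Char)) : ∀ (n acc : Int),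
    (PySem.List.enumerate segs n).foldl
      (fun (acc : Int) (p : Int × List Char) =>
        if PySem.Int.mod p.1 2 == 0 then acc + (PySem.Chars.count p.2 sep.toList : Int) else acc)
      acc = acc + segsum sepc segs (PySem.Int.mod n 2 == 0) := by
  induction segs with
  | nil => intro n acc; simp [PySem.List.enumerate_nil, segsum]
  | cons s ss ih =>
    intro n acc
    rw [PySem.List.enumerate_cons]
    simp only [List.foldl_cons]
    by_cases h : (PySem.Int.mod n 2 == 0) = true
    · rw [if_pos h, ih, mod_two_succ, h, hsep, count_single]
      simp [segsum, h]
      ring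
    · simp only [Bool.not_eq_true] at h
      rw [if_neg (by simp only [h]; simp), ih, mod_two_succ, h]
      simp [segsum]

theorem a_zero_of_sep_len_ne_one (sep : String) (hsep : sep.toList.length ≠ 1)
    (cs : List Char) : ∀ (inside : Bool) (n : Int),
    (cs.foldl
      (fun (st : Bool × Int) (char : Char) =>
        if char == '"' then (!st.1, st.2)
        else if [char] == sep.toList && !st.1 then (st.1, st.2 + 1)
        else st)
      (inside, n)).2 = n := by
  induction cs with
  | nil => intro inside n; rfl
  | cons c cs ih =>
    intro inside n
    have hne : ([c] == sep.toList) = false := by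
      rw [beq_eq_false_iff_ne]
      intro h
      exact hsep (by rw [← h]; rfl)
    simp only [List.foldl_cons]
    by_cases hc : c = '"'
    · subst hc; rw [if_pos (by simp)]; exact ih _ _
    · rw [if_neg (by simp [hc]), if_neg (by simp [hne])]; exact ih _ _

-- ===== VERDICT (by name: the statement is the Claim_ definition above) =====
theorem n_line_seps_py_spec : Claim_equal_n_line_seps_py := by
  intro line sep _
  unfold Spec_n_line_seps_py n_line_seps_py n_line_seps_py_alt
  by_cases hlen : PySem.Str.len sep ≠ 1
  · rw [if_pos hlen]
    have hne : sep.toList.length ≠ 1 := fun h => hlen (by simp [PySem.Str.len, h])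
    exact a_zero_of_sep_len_ne_one sep hne line.toList false 0
  · rw [if_neg hlen]
    have hl : sep.toList.length = 1 := by
      have := not_ne_iff.mp hlen
      simpa [PySem.Str.len] using this
    obtain ⟨sepc, hsep⟩ : ∃ c, sep.toList = [c] := by
      cases h : sep.toList with
      | nil => simp [h] at hl
      | cons a t =>
        cases t with
        | nil => exact ⟨a, rfl⟩
        | cons b t' => simp [h] at hl
    rw [b_loop_eq_segsum sepc sep hsep _ 0 0]
    rw [a_loop_invariant sepc sep hsep line.toList false 0]
    rw [splitOn_single]
    have : (PySem.Int.mod 0 2 == 0) = true := by decide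
    rw [this]
    rfl
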